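-- pv_equiv track=rewrite | github.com/danielppd/ros_solucionador_labirinto | solucionador_labirinto/algoritmos.py | processar_mapa
-- ===== SOURCE A (Python) =====
-- def processar_mapa(lista_achatada, largura, altura):
--     """
--     Transforma a lista de letras em uma matriz e acha onde está o robô ('r') e o alvo ('t').
--     """
--     mapa = []
--     inicio = None
--     alvo = None
--
--     for i in range(altura):
--         # pega o pedaço da lista que corresponde a uma linha
--         inicio_linha = i * largura
--         fim_linha = (i + 1) * largura
--         linha = lista_achatada[inicio_linha:fim_linha]
--         mapa.append(linha)
--
--         # procura robô e alvo nesta linha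
--         if 'r' in linha:
--             inicio = (i, linha.index('r')) # (linha, coluna)
--         if 't' in linha:
--             alvo = (i, linha.index('t'))
--
--     return mapa, inicio, alvo
-- ===== SOURCE B (Python) =====
-- def processar_mapa(lista_achatada, largura, altura):
--     """
--     Transforma a lista de letras em uma matriz e acha onde está o robô ('r') e o alvo ('t').
--     """
--     mapa = [lista_achatada[i * largura:(i + 1) * largura] for i in range(altura)]
--     celulas = lista_achatada[:largura * altura]
--     inicio = None
--     alvo = None
--     if 'r' in celulas:
--         inicio = divmod(celulas.index('r'), largura)
--     if 't' in celulas: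
--         alvo = divmod(celulas.index('t'), largura)
--     return mapa, inicio, alvo
-- ===== Notes on version B (the rewrite author's own statement) =====
-- stated objective: alternative
-- what changed: B builds the matrix with one slicing comprehension and locates robot/target with a single .index on the flat cell prefix plus divmod, instead of A's per-row loop of append + membership + .index; Pre_ excludes negative dimensions (A's values there are accidents of Python's negative-slice clamping) and maps where 'r' or 't' occurs in more than one row (a first-vs-last-match corner: A reports the last such row, B the first flat occurrence).
-- outside the precondition, e.g. on processar_mapa(['r', 'x'], -1, 2): A returns ([['r'], []], (0, 0), None), B returns ([['r'], []], None, None)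
import Mathlib
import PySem

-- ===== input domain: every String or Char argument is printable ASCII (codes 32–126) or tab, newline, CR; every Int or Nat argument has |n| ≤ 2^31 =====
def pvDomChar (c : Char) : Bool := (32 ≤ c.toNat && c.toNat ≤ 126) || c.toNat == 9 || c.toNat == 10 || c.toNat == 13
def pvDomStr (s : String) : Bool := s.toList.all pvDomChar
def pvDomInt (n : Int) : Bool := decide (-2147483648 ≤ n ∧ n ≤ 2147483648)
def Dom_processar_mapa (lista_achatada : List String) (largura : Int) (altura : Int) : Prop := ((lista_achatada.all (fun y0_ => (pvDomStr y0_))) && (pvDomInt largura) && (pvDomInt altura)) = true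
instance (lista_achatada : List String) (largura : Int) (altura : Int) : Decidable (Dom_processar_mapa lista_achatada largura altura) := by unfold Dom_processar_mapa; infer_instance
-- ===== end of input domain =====

-- B builds the matrix with one slicing comprehension and locates the robot/target by a single
-- .index on the flat cell prefix plus divmod, instead of A's per-row append + membership + .index loop;
-- objective: alternative decomposition (same asymptotic cost).


-- ===== PORT A =====
-- for i in range(altura): linha = lista[i*largura:(i+1)*largura]; mapa.append(linha);
--   if 'r' in linha: inicio = (i, linha.index('r'));  if 't' in linha: alvo = (i, linha.index('t'))
-- linha.index(c) is called only under the membership guard, so index? is some there; getD 0 is exact.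
def processar_mapa (lista_achatada : List String) (largura : Int) (altura : Int) :
    List (List String) × (Option (Int × Int)) × (Option (Int × Int)) :=
  (PySem.List.pyRange 0 altura 1).foldl
    (fun st i =>
      let linha := PySem.List.slice lista_achatada (some (i * largura)) (some ((i + 1) * largura))
      let mapa := st.1 ++ [linha]
      let inicio := if linha.contains "r" then
          some (i, (((PySem.List.index? linha "r").getD 0 : Nat) : Int)) else st.2.1
      let alvo := if linha.contains "t" then
          some (i, (((PySem.List.index? linha "t").getD 0 : Nat) : Int)) else st.2.2
      (mapa, inicio, alvo))
    ([], none, none)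

-- ===== PORT B =====
-- mapa = [lista[i*largura:(i+1)*largura] for i in range(altura)]; celulas = lista[:largura*altura];
-- if 'r' in celulas: inicio = divmod(celulas.index('r'), largura)   (same for 't').
-- divmod(a, b) is ported as (floordiv a b, mod a b); it is reached only with a nonempty celulas,
-- hence largura ≠ 0, so this is exact.  .index under the membership guard: index? is some, getD 0 exact.
def processar_mapa_alt (lista_achatada : List String) (largura : Int) (altura : Int) :
    List (List String) × (Option (Int × Int)) × (Option (Int × Int)) :=
  let mapa := (PySem.List.pyRange 0 altura 1).map (fun i =>
      PySem.List.slice lista_achatada (some (i * largura)) (some ((i + 1) * largura)))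
  let celulas := PySem.List.slice lista_achatada none (some (largura * altura))
  let inicio := if celulas.contains "r" then
      some (PySem.Int.floordiv (((PySem.List.index? celulas "r").getD 0 : Nat) : Int) largura,
            PySem.Int.mod (((PySem.List.index? celulas "r").getD 0 : Nat) : Int) largura)
    else none
  let alvo := if celulas.contains "t" then
      some (PySem.Int.floordiv (((PySem.List.index? celulas "t").getD 0 : Nat) : Int) largura,
            PySem.Int.mod (((PySem.List.index? celulas "t").getD 0 : Nat) : Int) largura)
    else none
  (mapa, inicio, alvo)

-- ===== PRECONDITION & SPEC =====
-- row k of the reshaped matrix, in Nat form (used by Pre_ below and by the proofs)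
def rowOf (lista : List String) (w k : Nat) : List String := (lista.drop (w * k)).take w

-- number of rows of the reshaped matrix that can be nonempty (all further rows are empty slices);
-- bounding the count by it keeps Pre_ cheaply decidable even for a huge altura
def effRows (len w h : Nat) : Nat := min h ((len + w - 1) / w)

-- Pre_ excludes (a) negative dimensions, where A's values are accidents of Python's negative-slice
-- clamping, and (b) maps in which 'r' (or 't') occurs in more than one row: there A reports the last
-- row containing the letter while B reports the first flat occurrence — a first-vs-last-match corner
-- where either value is defensible.
def Pre_processar_mapa (lista_achatada : List String) (largura : Int) (altura : Int) : Prop :=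
  0 ≤ largura ∧ 0 ≤ altura ∧
  (List.range (effRows lista_achatada.length largura.toNat altura.toNat)).countP
    (fun k => (rowOf lista_achatada largura.toNat k).contains "r") ≤ 1 ∧
  (List.range (effRows lista_achatada.length largura.toNat altura.toNat)).countP
    (fun k => (rowOf lista_achatada largura.toNat k).contains "t") ≤ 1
instance (lista_achatada : List String) (largura : Int) (altura : Int) : Decidable (Pre_processar_mapa lista_achatada largura altura) := by unfold Pre_processar_mapa; infer_instance

def pvWitness_processar_mapa : List String × Int × Int := (["r", ".", ".", "t"], 2, 2)

def Spec_processar_mapa (lista_achatada : List String) (largura : Int) (altura : Int) (out : List (List String) × (Option (Int × Int)) × (Option (Int × Int))) : Prop := out = processar_mapa_alt lista_achatada largura altura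
instance (lista_achatada : List String) (largura : Int) (altura : Int) (out : List (List String) × (Option (Int × Int)) × (Option (Int × Int))) : Decidable (Spec_processar_mapa lista_achatada largura altura out) := by unfold Spec_processar_mapa; infer_instance

-- ===== CLAIM (what is proved, stated in full; the proofs are below) =====
def Claim_equal_processar_mapa : Prop := ∀ (lista_achatada : List String) (largura : Int) (altura : Int), Dom_processar_mapa lista_achatada largura altura → Pre_processar_mapa lista_achatada largura altura → Spec_processar_mapa lista_achatada largura altura (processar_mapa lista_achatada largura altura)

-- ===== LEMMAS AND PROOFS =====

-- A's loop body in Nat form over row indices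
def stepA (lista : List String) (w : Nat)
    (st : List (List String) × Option (Int × Int) × Option (Int × Int)) (k : Nat) :
    List (List String) × Option (Int × Int) × Option (Int × Int) :=
  let linha := rowOf lista w k
  (st.1 ++ [linha],
   (if linha.contains "r" then some (((k : Nat) : Int), (((PySem.List.index? linha "r").getD 0 : Nat) : Int)) else st.2.1),
   (if linha.contains "t" then some (((k : Nat) : Int), (((PySem.List.index? linha "t").getD 0 : Nat) : Int)) else st.2.2))

-- the A-side position accumulator for one letter
def lastHit (lista : List String) (w : Nat) (t : String) (h : Nat) : Option (Int × Int) :=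
  (List.range h).foldl
    (fun o k => if (rowOf lista w k).contains t then
        some (((k : Nat) : Int), (((PySem.List.index? (rowOf lista w k) t).getD 0 : Nat) : Int)) else o)
    none

-- the B-side position expression for one letter
def firstHit (cel : List String) (w : Int) (t : String) : Option (Int × Int) :=
  if cel.contains t then
    some (PySem.Int.floordiv (((PySem.List.index? cel t).getD 0 : Nat) : Int) w,
          PySem.Int.mod (((PySem.List.index? cel t).getD 0 : Nat) : Int) w)
  else none

theorem foldA_eq (lista : List String) (w h : Nat) :
    (List.range h).foldl (stepA lista w) ([], none, none) =
      ((List.range h).map (rowOf lista w), lastHit lista w "r" h, lastHit lista w "t" h) := by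
  induction h with
  | zero => rfl
  | succ h ih =>
    rw [lastHit, lastHit, List.range_succ, List.foldl_append, List.foldl_cons, List.foldl_nil, ih,
        List.foldl_append, List.foldl_cons, List.foldl_nil,
        List.foldl_append, List.foldl_cons, List.foldl_nil]
    simp [stepA, lastHit]

theorem take_flatten (lista : List String) (w h : Nat) :
    lista.take (w * h) = ((List.range h).map (rowOf lista w)).flatten := by
  induction h with
  | zero => simp
  | succ h ih =>
    rw [Nat.mul_succ, List.take_add, ih, List.range_succ]
    simp [rowOf]

theorem index?_append_of_not_mem {α : Type} [BEq α] [LawfulBEq α] (pre ys : List α) (v : α)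
    (hv : v ∉ pre) :
    PySem.List.index? (pre ++ ys) v = (PySem.List.index? ys v).map (· + pre.length) := by
  induction pre with
  | nil => simp
  | cons x pre ih =>
    have hx : x ≠ v := fun hxv => hv (by simp [hxv])
    rw [List.cons_append, PySem.List.index?_cons_of_ne _ hx, ih (fun hm => hv (by simp [hm]))]
    cases PySem.List.index? ys v
    · simp
    · simp; omega

theorem countP_range_drop (p : Nat → Bool) (m h : Nat) (hm : m ≤ h)
    (hp : ∀ k, m ≤ k → k < h → p k = false) :
    (List.range h).countP p = (List.range m).countP p := by
  induction h with
  | zero => rw [Nat.le_zero.mp hm]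
  | succ h ih =>
    by_cases hmh : m = h + 1
    · subst hmh; rfl
    · have hm' : m ≤ h := by omega
      rw [List.range_succ, List.countP_append, ih hm' (fun k h1 h2 => hp k h1 (by omega))]
      simp [hp h hm' (Nat.lt_succ_self h)]

-- a row at or beyond effRows (but below h) is the empty slice
theorem rowOf_eff_nil (lista : List String) (w h k : Nat)
    (h1 : effRows lista.length w h ≤ k) (h2 : k < h) : rowOf lista w k = [] := by
  rcases Nat.eq_zero_or_pos w with hw | hw
  · subst hw; simp [rowOf]
  · have hceil : (lista.length + w - 1) / w ≤ k := by
      rw [effRows] at h1; omega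
    have hdm := Nat.div_add_mod (lista.length + w - 1) w
    have hmod := Nat.mod_lt (lista.length + w - 1) hw
    have hlen : lista.length ≤ w * k := by
      have : lista.length ≤ w * ((lista.length + w - 1) / w) := by omega
      calc lista.length ≤ w * ((lista.length + w - 1) / w) := this
        _ ≤ w * k := Nat.mul_le_mul_left w hceil
    rw [rowOf, List.drop_eq_nil_of_le hlen, List.take_nil]

-- the count over the effRows prefix bounds the count over all rows
theorem countP_all_of_eff (lista : List String) (w h : Nat) (t : String)
    (hc : (List.range (effRows lista.length w h)).countP
        (fun k => (rowOf lista w k).contains t) ≤ 1) :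
    (List.range h).countP (fun k => (rowOf lista w k).contains t) ≤ 1 := by
  rw [countP_range_drop _ (effRows lista.length w h) h (Nat.min_le_left _ _)
      (fun k h1 h2 => by rw [rowOf_eff_nil lista w h k h1 h2]; rfl)]
  exact hc

theorem lastHit_eq_firstHit (lista : List String) (w : Nat) (t : String) (h : Nat)
    (hcnt : (List.range h).countP (fun k => (rowOf lista w k).contains t) ≤ 1) :
    lastHit lista w t h = firstHit (lista.take (w * h)) (w : Int) t := by
  induction h with
  | zero => simp [lastHit, firstHit]
  | succ h ih =>
    have hsplit : lista.take (w * (h + 1)) = lista.take (w * h) ++ rowOf lista w h := by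
      rw [Nat.mul_succ, List.take_add]; rfl
    have hcnt_split : (List.range (h + 1)).countP (fun k => (rowOf lista w k).contains t) =
        (List.range h).countP (fun k => (rowOf lista w k).contains t) +
          (if (rowOf lista w h).contains t then 1 else 0) := by
      rw [List.range_succ, List.countP_append]
      simp [List.countP_cons]
    have hstep : lastHit lista w t (h + 1) =
        if (rowOf lista w h).contains t then
          some (((h : Nat) : Int), (((PySem.List.index? (rowOf lista w h) t).getD 0 : Nat) : Int))
        else lastHit lista w t h := by
      rw [lastHit, List.range_succ, List.foldl_append, List.foldl_cons, List.foldl_nil]; rfl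
    by_cases hrow : (rowOf lista w h).contains t
    · -- the (unique) hit is in row h: every earlier row is clean
      have hcnt0 : (List.range h).countP (fun k => (rowOf lista w k).contains t) = 0 := by
        rw [hcnt_split, if_pos hrow] at hcnt; omega
      have hclean : ∀ k < h, ¬((rowOf lista w k).contains t = true) := by
        intro k hk hc
        exact (List.countP_eq_zero.mp hcnt0 k (List.mem_range.mpr hk)) hc
      have hmem_row : t ∈ rowOf lista w h := by simpa using hrow
      have hnotpre : t ∉ lista.take (w * h) := by
        intro hm
        rw [take_flatten] at hm
        obtain ⟨l, hl, hml⟩ := List.mem_flatten.mp hm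
        obtain ⟨k, hk, rfl⟩ := List.mem_map.mp hl
        exact hclean k (List.mem_range.mp hk) (by simpa using hml)
      -- row h nonempty ⇒ the prefix is full and 0 < w
      have hrow_ne : rowOf lista w h ≠ [] := fun he => by simp [he] at hmem_row
      have hlen_row : (rowOf lista w h).length ≤ w := by
        rw [rowOf]; exact List.length_take_le _ _
      have hwpos : 0 < w := by
        by_contra hw
        have : w = 0 := by omega
        subst this
        exact hrow_ne (by simp [rowOf])
      have hdrop_ne : w * h < lista.length := by
        by_contra hge
        exact hrow_ne (by rw [rowOf, List.drop_eq_nil_of_le (by omega), List.take_nil])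
      have hprelen : (lista.take (w * h)).length = w * h := by
        rw [List.length_take]; omega
      -- the flat index of the hit
      obtain ⟨j, hj⟩ := Option.isSome_iff_exists.mp
        ((PySem.List.index?_isSome_iff (xs := rowOf lista w h) (v := t)).mpr hmem_row)
      obtain ⟨hjlt, -, -⟩ := PySem.List.getElem_of_index?_eq_some hj
      have hjw : j < w := by omega
      have hidx : PySem.List.index? (lista.take (w * (h + 1))) t = some (j + w * h) := by
        rw [hsplit, index?_append_of_not_mem _ _ _ hnotpre, hj, hprelen]; rfl
      have hmem_app : t ∈ lista.take (w * (h + 1)) := by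
        rw [hsplit]; exact List.mem_append_right _ hmem_row
      have hdiv : PySem.Int.floordiv (((j + w * h : Nat) : Int)) (w : Int) = ((h : Nat) : Int) := by
        rw [PySem.Int.floordiv_natCast]
        congr 1
        rw [Nat.add_mul_div_left _ _ hwpos, Nat.div_eq_of_lt hjw]; omega
      have hmod : PySem.Int.mod (((j + w * h : Nat) : Int)) (w : Int) = ((j : Nat) : Int) := by
        rw [PySem.Int.mod_natCast]
        congr 1
        rw [Nat.add_mul_mod_self_left, Nat.mod_eq_of_lt hjw]
      rw [hstep, if_pos hrow, firstHit, if_pos (by simpa using hmem_app), hidx, hj]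
      simp only [Option.getD_some]
      rw [hdiv, hmod]
    · -- row h is clean: nothing changes on either side
      have hcnt' : (List.range h).countP (fun k => (rowOf lista w k).contains t) ≤ 1 := by
        rw [hcnt_split, if_neg hrow] at hcnt; omega
      have hnotrow : t ∉ rowOf lista w h := by simpa using hrow
      rw [hstep, if_neg hrow, ih hcnt', firstHit, firstHit, hsplit]
      by_cases hpre : t ∈ lista.take (w * h)
      · rw [if_pos (by simpa using hpre),
            if_pos (by simpa using List.mem_append_left _ hpre),
            PySem.List.index?_append_of_mem _ hpre]
      · have : t ∉ lista.take (w * h) ++ rowOf lista w h := by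
          intro hm
          rcases List.mem_append.mp hm with h1 | h2
          · exact hpre h1
          · exact hnotrow h2
        rw [if_neg (by simpa using hpre), if_neg (by simpa using this)]

-- ===== VERDICT (by name: the statement is the Claim_ definition above) =====
theorem processar_mapa_spec : Claim_equal_processar_mapa := by
  intro lista largura altura _hDom hPre
  obtain ⟨hw0, hh0, hcr, hct⟩ := hPre
  obtain ⟨w, rfl⟩ := Int.eq_ofNat_of_zero_le hw0
  obtain ⟨h, rfl⟩ := Int.eq_ofNat_of_zero_le hh0
  simp only [Int.toNat_natCast] at hcr hct
  unfold Spec_processar_mapa processar_mapa processar_mapa_alt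
  have hsliceEq : ∀ k : Nat,
      PySem.List.slice lista (some ((k : Int) * (w : Int))) (some (((k : Int) + 1) * (w : Int))) =
        rowOf lista w k := by
    intro k
    have h1 : (k : Int) * (w : Int) = ((w * k : Nat) : Int) := by push_cast; ring
    have h2 : ((k : Int) + 1) * (w : Int) = ((w * k : Nat) : Int) + ((w : Nat) : Int) := by
      push_cast; ring
    rw [h1, h2, PySem.List.slice_natCast_add, rowOf]
  have hfoldA :
      (PySem.List.pyRange 0 ((h : Nat) : Int) 1).foldl
        (fun st i =>
          let linha := PySem.List.slice lista (some (i * (w : Int))) (some ((i + 1) * (w : Int)))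
          let mapa := st.1 ++ [linha]
          let inicio := if linha.contains "r" then
              some (i, (((PySem.List.index? linha "r").getD 0 : Nat) : Int)) else st.2.1
          let alvo := if linha.contains "t" then
              some (i, (((PySem.List.index? linha "t").getD 0 : Nat) : Int)) else st.2.2
          (mapa, inicio, alvo))
        ([], none, none) =
      (List.range h).foldl (stepA lista w) ([], none, none) := by
    rw [PySem.List.pyRange_zero_nat, List.foldl_map]
    congr 1
    funext st k
    simp only [hsliceEq k, stepA]
  have hmapB :
      (PySem.List.pyRange 0 ((h : Nat) : Int) 1).map (fun i =>
        PySem.List.slice lista (some (i * (w : Int))) (some ((i + 1) * (w : Int)))) =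
      (List.range h).map (rowOf lista w) := by
    rw [PySem.List.pyRange_zero_nat, List.map_map]
    exact List.map_congr_left (fun k _ => hsliceEq k)
  have hcel : PySem.List.slice lista none (some ((w : Int) * ((h : Nat) : Int))) =
      lista.take (w * h) := by
    have : (w : Int) * ((h : Nat) : Int) = ((w * h : Nat) : Int) := by push_cast; ring
    rw [this, PySem.List.slice_to_natCast]
  simp only [hfoldA, hmapB, hcel, foldA_eq]
  rw [lastHit_eq_firstHit lista w "r" h (countP_all_of_eff lista w h "r" hcr),
      lastHit_eq_firstHit lista w "t" h (countP_all_of_eff lista w h "t" hct)]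
  rfl
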